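-- pv_equiv track=rewrite | github.com/SalmaEzz10/NLPCloud | main.py | buildWordTags
-- ===== SOURCE A (Python) =====
-- def buildWordTags(word_ids, preds, idLabel):
--     wordTags = {}
--     prevWord = None
--     for idx, wordIdx in enumerate(word_ids):
--         if wordIdx is None or wordIdx == prevWord:
--             prevWord = wordIdx
--             continue
--         wordTags[wordIdx] = idLabel[preds[idx]]
--         prevWord = wordIdx
--     return wordTags
-- ===== SOURCE B (Python) =====
-- def buildWordTags(word_ids, preds, idLabel):
--     wordTags = {}
--     i, n = 0, len(word_ids)
--     while i < n:
--         key = word_ids[i]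
--         j = i + 1
--         while j < n and word_ids[j] == key:
--             j += 1
--         if key is not None:
--             wordTags[key] = idLabel[preds[i]]
--         i = j
--     return wordTags
-- ===== Notes on version B (the rewrite author's own statement) =====
-- stated objective: alternative
-- what changed: A's single enumerate pass with a prevWord state variable is replaced by an outer/inner two-pointer run-scan: the outer loop jumps from run start to run start, an inner while advances a second index past the maximal run of equal word indices, and one assignment is made per non-None run.
import Mathlib
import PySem

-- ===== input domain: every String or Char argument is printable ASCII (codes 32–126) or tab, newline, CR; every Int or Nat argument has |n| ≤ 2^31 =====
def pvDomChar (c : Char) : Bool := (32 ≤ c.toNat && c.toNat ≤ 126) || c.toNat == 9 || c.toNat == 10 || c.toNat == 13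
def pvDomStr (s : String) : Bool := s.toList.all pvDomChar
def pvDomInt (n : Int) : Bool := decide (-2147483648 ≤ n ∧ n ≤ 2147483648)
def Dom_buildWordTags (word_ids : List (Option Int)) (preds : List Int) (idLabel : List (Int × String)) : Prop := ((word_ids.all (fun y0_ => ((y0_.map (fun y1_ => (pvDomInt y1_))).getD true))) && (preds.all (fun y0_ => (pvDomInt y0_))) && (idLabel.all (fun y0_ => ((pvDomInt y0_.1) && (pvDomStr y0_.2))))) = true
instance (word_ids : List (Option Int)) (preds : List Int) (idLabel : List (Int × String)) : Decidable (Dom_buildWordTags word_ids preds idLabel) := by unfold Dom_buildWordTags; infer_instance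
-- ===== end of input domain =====

-- B replaces A's enumerate pass with a prevWord state variable by a two-pointer run-scan:
-- the outer loop jumps run start to run start, an inner scan skips the maximal run of equal
-- word indices, one assignment per non-None run (objective: alternative; same O(n) cost).

-- ===== PORT A =====
-- literal port of A: fold over enumerate(word_ids) carrying (wordTags, prevWord)
def buildWordTags (word_ids : List (Option Int)) (preds : List Int) (idLabel : List (Int × String)) : List (Int × String) :=
  (((PySem.List.enumerate word_ids).foldl
      (fun (st : PySem.Dict Int String × Option Int) (p : Int × Option Int) =>
        if p.2 = none ∨ p.2 = st.2 then (st.1, p.2)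
        else (st.1.insert (p.2.getD 0)
                (((PySem.Dict.ofList idLabel).get? ((PySem.List.pyGet? preds p.1).getD 0)).getD ""),
              p.2))
      (PySem.Dict.empty, none)).1).items

-- ===== PORT B =====
-- literal port of B's outer while loop: the suffix word_ids[i:] is the remaining list, the
-- inner `while j < n and word_ids[j] == key` scan is the takeWhile/dropWhile of the run of
-- elements equal to the run's first element; i advances by the run length.
def pvGoB (preds : List Int) (idLabel : List (Int × String)) :
    List (Option Int) → Int → PySem.Dict Int String → PySem.Dict Int String
  | [], _, d => d
  | x :: xs, i, d =>
      pvGoB preds idLabel (xs.dropWhile (fun y => y == x))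
        (i + 1 + (xs.takeWhile (fun y => y == x)).length)
        (if x ≠ none then
           d.insert (x.getD 0)
             (((PySem.Dict.ofList idLabel).get? ((PySem.List.pyGet? preds i).getD 0)).getD "")
         else d)
  termination_by xs => xs.length
  decreasing_by exact Nat.lt_succ_of_le (List.length_dropWhile_le _ _)

def buildWordTags_alt (word_ids : List (Option Int)) (preds : List Int) (idLabel : List (Int × String)) : List (Int × String) :=
  (pvGoB preds idLabel word_ids 0 PySem.Dict.empty).items

-- ===== PRECONDITION & SPEC =====
-- Pre_ excludes exactly the inputs where Python A raises: at each run-start position k with a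
-- non-None word index, preds[k] must exist (else IndexError) and be a key of idLabel (else KeyError).
def Pre_buildWordTags (word_ids : List (Option Int)) (preds : List Int) (idLabel : List (Int × String)) : Prop :=
  ∀ k < word_ids.length,
    ((word_ids[k]?.getD none) ≠ none ∧ (k = 0 ∨ word_ids[k-1]? ≠ word_ids[k]?)) →
      k < preds.length ∧ (preds[k]?.getD 0) ∈ idLabel.map Prod.fst
instance (word_ids : List (Option Int)) (preds : List Int) (idLabel : List (Int × String)) : Decidable (Pre_buildWordTags word_ids preds idLabel) := by unfold Pre_buildWordTags; infer_instance

def pvWitness_buildWordTags : List (Option Int) × List Int × (List (Int × String)) :=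
  ([some 0, some 0, none, some 1], [3, 0, 0, 5], [(3, "B-PER"), (5, "O")])

def Spec_buildWordTags (word_ids : List (Option Int)) (preds : List Int) (idLabel : List (Int × String)) (out : List (Int × String)) : Prop := out = buildWordTags_alt word_ids preds idLabel
instance (word_ids : List (Option Int)) (preds : List Int) (idLabel : List (Int × String)) (out : List (Int × String)) : Decidable (Spec_buildWordTags word_ids preds idLabel out) := by unfold Spec_buildWordTags; infer_instance

-- ===== CLAIM (what is proved, stated in full; the proofs are below) =====
def Claim_equal_buildWordTags : Prop := ∀ (word_ids : List (Option Int)) (preds : List Int) (idLabel : List (Int × String)), Dom_buildWordTags word_ids preds idLabel → Pre_buildWordTags word_ids preds idLabel → Spec_buildWordTags word_ids preds idLabel (buildWordTags word_ids preds idLabel)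

-- ===== LEMMAS AND PROOFS =====

-- abbreviation for A's loop body (proof-local)
def pvStepA (preds : List Int) (idLabel : List (Int × String))
    (st : PySem.Dict Int String × Option Int) (p : Int × Option Int) :
    PySem.Dict Int String × Option Int :=
  if p.2 = none ∨ p.2 = st.2 then (st.1, p.2)
  else (st.1.insert (p.2.getD 0)
          (((PySem.Dict.ofList idLabel).get? ((PySem.List.pyGet? preds p.1).getD 0)).getD ""),
        p.2)

-- the head of dropWhile (· == x) is never x
lemma pv_head_dropWhile_ne (x : Option Int) :
    ∀ xs : List (Option Int), (xs.dropWhile (fun y => y == x)).head? ≠ some x := by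
  intro xs
  induction xs with
  | nil => simp [List.dropWhile]
  | cons y ys ih =>
      by_cases h : y = x
      · have hb : (y == x) = true := by simp [h]
        simpa [List.dropWhile, hb] using ih
      · have hb : (y == x) = false := by simp [h]
        simp [List.dropWhile, hb, h]

-- A's fold skips a run of elements equal to its current prevWord, leaving the dict unchanged
lemma pv_skip (preds : List Int) (idLabel : List (Int × String)) :
    ∀ (xs : List (Option Int)) (i : Int) (d : PySem.Dict Int String) (x : Option Int),
      (PySem.List.enumerate xs i).foldl (pvStepA preds idLabel) (d, x)
        = (PySem.List.enumerate (xs.dropWhile (fun y => y == x))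
             (i + (xs.takeWhile (fun y => y == x)).length)).foldl (pvStepA preds idLabel) (d, x) := by
  intro xs
  induction xs with
  | nil => intro i d x; simp [List.dropWhile, List.takeWhile]
  | cons y ys ih =>
      intro i d x
      by_cases h : y = x
      · have hb : (y == x) = true := by simp [h]
        rw [PySem.List.enumerate_cons, List.foldl_cons]
        have hstep : pvStepA preds idLabel (d, x) (i, y) = (d, x) := by
          simp [pvStepA, h]
        rw [hstep]
        have := ih (i + 1) d x
        simp only [List.dropWhile, List.takeWhile, hb, List.length_cons] at *
        rw [this]
        congr 1
        push_cast
        ring_nf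
      · have hb : (y == x) = false := by simp [h]
        simp [List.dropWhile, List.takeWhile, hb]

-- main invariant: at a run boundary (head differs from prevWord) A's fold equals B's run-scan
lemma pv_main (preds : List Int) (idLabel : List (Int × String)) :
    ∀ (n : Nat) (xs : List (Option Int)), xs.length ≤ n →
      ∀ (i : Int) (d : PySem.Dict Int String) (pw : Option Int),
        (xs.head? = some pw → pw = none) →
        ((PySem.List.enumerate xs i).foldl (pvStepA preds idLabel) (d, pw)).1
          = pvGoB preds idLabel xs i d := by
  intro n
  induction n with
  | zero =>
      intro xs hlen i d pw _
      have : xs = [] := List.eq_nil_of_length_eq_zero (Nat.le_zero.mp hlen)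
      subst this
      simp [pvGoB]
  | succ n ih =>
      intro xs hlen i d pw hhd
      cases xs with
      | nil => simp [pvGoB]
      | cons x xs =>
          have hx : x ≠ none → x ≠ pw := by
            intro hn h; subst h; exact hn (hhd rfl)
          rw [PySem.List.enumerate_cons, List.foldl_cons]
          have hlen' : (xs.dropWhile (fun y => y == x)).length ≤ n := by
            have := List.length_dropWhile_le (fun y => y == x) xs
            simp at hlen; omega
          have hhd' : ((xs.dropWhile (fun y => y == x)).head? = some x → x = none) := by
            intro h; exact absurd h (pv_head_dropWhile_ne x xs)
          by_cases hnone : x = none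
          · have hstep : pvStepA preds idLabel (d, pw) (i, x) = (d, x) := by
              simp [pvStepA, hnone]
            rw [hstep, pv_skip, ih _ hlen' _ _ _ hhd']
            simp [pvGoB, hnone]
          · have hstep : pvStepA preds idLabel (d, pw) (i, x)
                = (d.insert (x.getD 0)
                     (((PySem.Dict.ofList idLabel).get? ((PySem.List.pyGet? preds i).getD 0)).getD ""),
                   x) := by
              simp [pvStepA, hnone, hx hnone]
            rw [hstep, pv_skip, ih _ hlen' _ _ _ hhd']
            simp [pvGoB, hnone]

-- ===== VERDICT (by name: the statement is the Claim_ definition above) =====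
theorem buildWordTags_spec : Claim_equal_buildWordTags := by
  intro word_ids preds idLabel _ _
  unfold Spec_buildWordTags buildWordTags buildWordTags_alt
  have := pv_main preds idLabel word_ids.length word_ids le_rfl 0 PySem.Dict.empty none (by intro _; rfl)
  exact congrArg PySem.Dict.items this
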